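-- pv_equiv track=rewrite | github.com/nzoladkiewicz/CS-115 | Homework/Homework 6/hw6.py | consecCount
-- ===== SOURCE A (Python) =====
-- def consecCount(S):
--     '''
--         Returns the number of consecutive integers.
--     '''
--     if S == '':
--         return 0
--     elif len(S) == 1:
--         return 1
--     elif S[0] == S[1]:
--         return 1 + consecCount(S[1:])
--     else:
--         return 1
-- ===== SOURCE B (Python) =====
-- def consecCount(S):
--     '''Length of the leading run of equal characters, by one linear scan.'''
--     if S == '':
--         return 0
--     first = S[0]
--     count = 0
--     for c in S:
--         if c != first:
--             break
--         count += 1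
--     return count
-- ===== Notes on version B (the rewrite author's own statement) =====
-- stated objective: faster
-- what changed: Replaced the recursion that re-slices the string (S[1:]) at every step with a single linear scan comparing each character to the first and stopping at the first mismatch.
import Mathlib
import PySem

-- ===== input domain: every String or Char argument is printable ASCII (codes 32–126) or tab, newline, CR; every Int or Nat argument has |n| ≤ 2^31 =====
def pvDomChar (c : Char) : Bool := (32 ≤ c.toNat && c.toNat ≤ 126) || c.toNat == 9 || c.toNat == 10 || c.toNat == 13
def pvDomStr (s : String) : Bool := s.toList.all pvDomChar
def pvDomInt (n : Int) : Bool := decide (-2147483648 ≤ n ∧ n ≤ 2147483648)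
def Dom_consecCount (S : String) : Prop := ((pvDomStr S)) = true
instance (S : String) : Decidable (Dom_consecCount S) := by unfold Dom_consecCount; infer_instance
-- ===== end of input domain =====

-- B replaces A's O(n^2) slicing recursion with a single linear scan comparing to the first char.


-- ===== PORT A =====
-- A's recursion: '' → 0, single char → 1, S[0]==S[1] → 1 + consecCount(S[1:]), else 1.
def consecCountA : List Char → Int
  | [] => 0
  | [_] => 1
  | a :: b :: t => if a == b then 1 + consecCountA (b :: t) else 1

def consecCount (S : String) : Int := consecCountA S.toList

-- ===== PORT B =====
-- B's loop: count characters equal to the first, break at the first mismatch.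
def consecCountB (first : Char) : List Char → Int
  | [] => 0
  | c :: t => if c ≠ first then 0 else 1 + consecCountB first t

def consecCount_alt (S : String) : Int :=
  match S.toList with
  | [] => 0
  | first :: _ => consecCountB first S.toList

-- ===== PRECONDITION & SPEC =====
def Spec_consecCount (S : String) (out : Int) : Prop := out = consecCount_alt S
instance (S : String) (out : Int) : Decidable (Spec_consecCount S out) := by unfold Spec_consecCount; infer_instance

-- ===== CLAIM (what is proved, stated in full; the proofs are below) =====
def Claim_equal_consecCount : Prop := ∀ (S : String), Dom_consecCount S → Spec_consecCount S (consecCount S)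

-- ===== LEMMAS AND PROOFS =====
theorem consecAB (t : List Char) : ∀ a : Char, consecCountA (a :: t) = consecCountB a (a :: t) := by
  induction t with
  | nil => intro a; simp [consecCountA, consecCountB]
  | cons b t' ih =>
      intro a
      by_cases h : a = b
      · subst h
        simp [consecCountA, consecCountB, ih a]
      · simp [consecCountA, consecCountB, h, Ne.symm h]

-- ===== VERDICT (by name: the statement is the Claim_ definition above) =====
theorem consecCount_spec : Claim_equal_consecCount := by
  intro S _
  unfold Spec_consecCount consecCount consecCount_alt
  cases h : S.toList with
  | nil => simp [consecCountA]
  | cons a t => exact consecAB t a
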